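-- pv_equiv track=rewrite | github.com/Brandt-moreThan4/Misc_Code | Ciphers/SubstitutionCipher/make_word_patterns.py | identify_patterns
-- ===== SOURCE A (Python) =====
-- def get_pattern(word):
--     """Gets the number pattern of a word. Separated by periods."""
--
--     word = word.upper()
--     pattern = []
--     letter_num = 0
--     used_letters = {}
--
--     for letter in word:
--         if letter in used_letters:
--             pattern.append(used_letters[letter])
--         else:
--             used_letters[letter] = str(letter_num)
--             pattern.append(str(letter_num))
--             letter_num += 1
--
--     return '.'.join(pattern)
--
-- def identify_patterns(words_list):
--     """Create a dictionary of word patterns."""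
--
--     all_patterns = {}
--     for word in words_list:
--         pattern = get_pattern(word)
--         if pattern not in all_patterns:
--             all_patterns[pattern] = [word]
--         else:
--             all_patterns[pattern].append(word)
--
--     return all_patterns
-- ===== SOURCE B (Python) =====
-- def get_pattern(word):
--     """Gets the number pattern of a word. Separated by periods."""
--
--     word = word.upper()
--     pattern = []
--     letter_num = 0
--     used_letters = {}
--
--     for letter in word:
--         if letter in used_letters:
--             pattern.append(used_letters[letter])
--         else:
--             used_letters[letter] = str(letter_num)
--             pattern.append(str(letter_num))
--             letter_num += 1
--
--     return '.'.join(pattern)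
--
-- def identify_patterns(words_list):
--     """Create a dictionary of word patterns."""
--
--     patterns = [get_pattern(word) for word in words_list]
--     return {p: [w for q, w in zip(patterns, words_list) if q == p]
--             for p in dict.fromkeys(patterns)}
-- ===== Notes on version B (the rewrite author's own statement) =====
-- stated objective: alternative
-- what changed: identify_patterns now precomputes the pattern of every word in one pass, dedups the pattern list in first-occurrence order, and builds each group by a zip-filter scan over (pattern, word) pairs, instead of accumulating hash-dict buckets word by word; get_pattern is unchanged.
import Mathlib
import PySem

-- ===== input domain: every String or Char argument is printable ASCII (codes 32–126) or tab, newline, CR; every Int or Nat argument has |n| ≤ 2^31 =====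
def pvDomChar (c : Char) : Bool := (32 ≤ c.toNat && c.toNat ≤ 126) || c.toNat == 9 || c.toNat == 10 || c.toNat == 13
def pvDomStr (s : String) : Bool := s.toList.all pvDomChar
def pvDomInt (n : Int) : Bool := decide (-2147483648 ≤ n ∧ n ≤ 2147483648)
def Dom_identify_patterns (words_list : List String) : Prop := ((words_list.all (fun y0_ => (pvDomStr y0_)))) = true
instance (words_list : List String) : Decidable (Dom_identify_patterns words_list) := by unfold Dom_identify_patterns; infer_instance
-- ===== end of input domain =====

-- B replaces the word-by-word hash-bucket accumulation by a two-phase build (compute all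
-- patterns, dedup in first-occurrence order, group each key by a zip-filter scan); same
-- result, no speed claim. get_pattern is shared unchanged by both versions.

-- ===== PORT A =====
-- helper get_pattern, shared verbatim by A and B (B's source keeps it unchanged)
def get_pattern (word : String) : String :=
  let word := PySem.Str.upper word
  let st := word.toList.foldl
    (fun (s : List String × Int × PySem.Dict Char String) letter =>
      let (pattern, letter_num, used_letters) := s
      if used_letters.contains letter then
        (pattern ++ [used_letters.getD letter ""], letter_num, used_letters)
      else
        (pattern ++ [PySem.Int.toStr letter_num], letter_num + 1,
          used_letters.insert letter (PySem.Int.toStr letter_num)))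
    ([], 0, PySem.Dict.empty)
  PySem.Str.join "." st.1

def identify_patterns (words_list : List String) : List (String × List String) :=
  let all_patterns := words_list.foldl
    (fun (all_patterns : PySem.Dict String (List String)) word =>
      let pattern := get_pattern word
      if all_patterns.contains pattern = false then
        all_patterns.insert pattern [word]
      else
        all_patterns.modify pattern [] (fun l => l ++ [word]))
    PySem.Dict.empty
  all_patterns.items

-- ===== PORT B =====
def identify_patterns_alt (words_list : List String) : List (String × List String) :=
  let patterns := words_list.map get_pattern
  (PySem.List.dedup patterns).map (fun p =>
    (p, ((patterns.zip words_list).filter (fun qw => qw.1 == p)).map (fun qw => qw.2)))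

-- ===== PRECONDITION & SPEC =====
def Spec_identify_patterns (words_list : List String) (out : List (String × List String)) : Prop := out = identify_patterns_alt words_list
instance (words_list : List String) (out : List (String × List String)) : Decidable (Spec_identify_patterns words_list out) := by unfold Spec_identify_patterns; infer_instance

-- ===== CLAIM (what is proved, stated in full; the proofs are below) =====
def Claim_equal_identify_patterns : Prop := ∀ (words_list : List String), Dom_identify_patterns words_list → Spec_identify_patterns words_list (identify_patterns words_list)

-- ===== LEMMAS AND PROOFS =====

-- A's loop body always amounts to d[p] = d.get(p, []) + [word]
theorem ip_step_eq (d : PySem.Dict String (List String)) (word : String) :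
    (let pattern := get_pattern word
     if d.contains pattern = false then d.insert pattern [word]
     else d.modify pattern [] (fun l => l ++ [word]))
    = d.modify (get_pattern word) [] (fun l => l ++ [word]) := by
  by_cases h : d.contains (get_pattern word) = false
  · simp [h, PySem.Dict.modify, PySem.Dict.getD_of_not_contains d ([] : List String) h]
  · simp [h]

theorem zip_map_self {α β : Type} (f : α → β) (l : List α) :
    (l.map f).zip l = l.map (fun x => (f x, x)) := by
  induction l with
  | nil => rfl
  | cons x xs ih => simp [ih]

theorem identify_patterns_eq (words_list : List String) :
    identify_patterns words_list = identify_patterns_alt words_list := by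
  unfold identify_patterns identify_patterns_alt
  have hstep : (fun (d : PySem.Dict String (List String)) word =>
      let pattern := get_pattern word
      if d.contains pattern = false then d.insert pattern [word]
      else d.modify pattern [] (fun l => l ++ [word]))
      = (fun d word => d.modify (get_pattern word) [] (fun l => l ++ [word])) := by
    funext d word; exact ip_step_eq d word
  rw [hstep]
  -- rewrite A's fold as a fold over (pattern, word) pairs
  have hfold : words_list.foldl
      (fun (d : PySem.Dict String (List String)) word =>
        d.modify (get_pattern word) [] (fun l => l ++ [word])) PySem.Dict.empty
      = (words_list.map (fun w => (get_pattern w, w))).foldl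
          (fun d p => d.modify p.1 [] (fun l => l ++ [p.2])) PySem.Dict.empty := by
    rw [List.foldl_map]
  rw [hfold]
  set l := words_list.map (fun w => (get_pattern w, w)) with hl
  have hnd : ((l.foldl (fun d p => d.modify p.1 [] (fun x => x ++ [p.2]))
      PySem.Dict.empty).keys).Nodup := by
    exact PySem.Dict.nodup_keys_foldl_modify_key l (fun p => p.1) []
      (fun _ p => fun x => x ++ [p.2]) PySem.Dict.empty (by simp [pysem])
  rw [PySem.Dict.items_eq_map_keys _ hnd []]
  have hkeys : (l.foldl (fun d p => d.modify p.1 [] (fun x => x ++ [p.2]))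
      PySem.Dict.empty).keys = PySem.Set.ofList (words_list.map get_pattern) := by
    rw [PySem.Dict.keys_foldl_modify_key l (fun p => p.1) []
      (fun _ p => fun x => x ++ [p.2]) PySem.Dict.empty]
    simp [hl, PySem.Dict.keys, PySem.Dict.empty, PySem.Set.update,
      PySem.Set.ofList_eq_foldl, List.map_map, Function.comp_def]
  rw [hkeys]
  simp only [zip_map_self, PySem.List.dedup_eq_ofList]
  refine List.map_congr_left (fun p _ => ?_)
  rw [PySem.Dict.getD_foldl_modify_append l PySem.Dict.empty p]
  simp [hl]

-- ===== VERDICT (by name: the statement is the Claim_ definition above) =====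
theorem identify_patterns_spec : Claim_equal_identify_patterns := by
  intro words_list _
  exact identify_patterns_eq words_list
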